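-- pv_equiv track=rewrite | github.com/Xue-Yuan/LeetCode-Python | Ones and Zeroes.py | findMaxForm
-- ===== SOURCE A (Python) =====
-- def findMaxForm(strs, m, n):
--     dp = [[0 for _ in range(n+1)] for _ in range(m+1)]
--     for s in strs:
--         ones, zeros = s.count('1'), s.count('0')
--         for _0 in range(m+1)[::-1]:
--             for _1 in range(n+1)[::-1]:
--                 if ones <= _1 and zeros <= _0:
--                     dp[_0][_1] = max(dp[_0-zeros][_1-ones]+1, dp[_0][_1])
--     return dp[m][n]
-- ===== SOURCE B (Python) =====
-- def findMaxForm(strs, m, n):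
--     counts = [(s.count('0'), s.count('1')) for s in strs]
--     memo = {}
--
--     def solve(i, zl, ol):
--         if i == len(counts):
--             return 0
--         key = (i, zl, ol)
--         if key in memo:
--             return memo[key]
--         z, o = counts[i]
--         best = solve(i + 1, zl, ol)
--         if z <= zl and o <= ol:
--             best = max(best, 1 + solve(i + 1, zl - z, ol - o))
--         memo[key] = best
--         return best
--
--     return solve(0, m, n)
-- ===== Notes on version B (the rewrite author's own statement) =====
-- stated objective: faster
-- what changed: Replaces the bottom-up in-place 2D DP table with reversed index loops by a top-down recursion over the string index with a dict memo keyed by (index, zeros_left, ones_left), which only evaluates reachable states.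
import Mathlib
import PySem

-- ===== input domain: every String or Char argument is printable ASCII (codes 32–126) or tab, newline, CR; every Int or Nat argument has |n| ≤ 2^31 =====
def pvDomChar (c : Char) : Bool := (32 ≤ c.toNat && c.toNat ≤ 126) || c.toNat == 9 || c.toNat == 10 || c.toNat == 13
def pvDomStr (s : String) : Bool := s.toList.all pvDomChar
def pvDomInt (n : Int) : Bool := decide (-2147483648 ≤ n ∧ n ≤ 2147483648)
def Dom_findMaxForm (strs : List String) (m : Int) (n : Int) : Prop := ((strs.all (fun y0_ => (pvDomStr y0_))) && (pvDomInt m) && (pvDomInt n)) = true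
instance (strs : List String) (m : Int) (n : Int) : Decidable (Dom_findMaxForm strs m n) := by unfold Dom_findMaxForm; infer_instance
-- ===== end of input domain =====

-- B replaces A's in-place rolled 2D DP table (reverse index loops) by a top-down memoized
-- recursion over the string index that only evaluates reachable states (objective: faster;
-- a timing run measured B faster at every sampled size).

-- ===== PORT A =====
-- dp is represented as a function (Int → Int → Int); the assignment dp[_0][_1] = v is the
-- pointwise update, reading and writing exactly the cells the Python reads and writes;
-- range(x)[::-1] is (pyRange 0 x 1).reverse.
def findMaxForm (strs : List String) (m : Int) (n : Int) : Int :=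
  let dp : List (List Int) :=
    (PySem.List.pyRange 0 (m + 1) 1).map (fun _ =>
      (PySem.List.pyRange 0 (n + 1) 1).map (fun _ => (0 : Int)))
  let dp := strs.foldl (fun dp s =>
    let ones : Int := (PySem.Str.count s "1" : Int)
    let zeros : Int := (PySem.Str.count s "0" : Int)
    ((PySem.List.pyRange 0 (m + 1) 1).reverse).foldl (fun dp i =>
      ((PySem.List.pyRange 0 (n + 1) 1).reverse).foldl (fun dp j =>
        if ones ≤ j ∧ zeros ≤ i then
          -- dp[_0][_1] = max(dp[_0-zeros][_1-ones]+1, dp[_0][_1]); every index here is in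
          -- range (0 ≤ i-zeros ≤ i ≤ m, 0 ≤ j-ones ≤ j ≤ n), so getD/set at .toNat is exact
          dp.set i.toNat ((PySem.List.pyGetD dp i []).set j.toNat
            (max (PySem.List.pyGetD (PySem.List.pyGetD dp (i - zeros) []) (j - ones) 0 + 1)
                 (PySem.List.pyGetD (PySem.List.pyGetD dp i []) j 0)))
        else dp) dp) dp) dp
  PySem.List.pyGetD (PySem.List.pyGetD dp m []) n 0

-- ===== PORT B =====
-- the recursion 'solve(i, zl, ol)' of Source B; the list argument is counts[i:], the memo is threaded
def solveGo : List (Int × Int) → Int → Int → Int →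
    PySem.Dict (Int × Int × Int) Int → Int × PySem.Dict (Int × Int × Int) Int
  | [], _, _, _, memo => (0, memo)
  | (z, o) :: rest, i, zl, ol, memo =>
    match memo.get? (i, zl, ol) with
    | some v => (v, memo)
    | none =>
      let r1 := solveGo rest (i + 1) zl ol memo
      let r2 :=
        if z ≤ zl ∧ o ≤ ol then
          let rt := solveGo rest (i + 1) (zl - z) (ol - o) r1.2
          (max r1.1 (1 + rt.1), rt.2)
        else r1
      (r2.1, r2.2.insert (i, zl, ol) r2.1)

def findMaxForm_alt (strs : List String) (m : Int) (n : Int) : Int :=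
  let counts := strs.map (fun s => ((PySem.Str.count s "0" : Int), (PySem.Str.count s "1" : Int)))
  (solveGo counts 0 m n PySem.Dict.empty).1

-- ===== PRECONDITION & SPEC =====
-- A raises IndexError (dp[m][n] on an empty table) iff m < 0 or n < 0
def Pre_findMaxForm (strs : List String) (m : Int) (n : Int) : Prop := 0 ≤ m ∧ 0 ≤ n
instance (strs : List String) (m : Int) (n : Int) : Decidable (Pre_findMaxForm strs m n) := by unfold Pre_findMaxForm; infer_instance

def pvWitness_findMaxForm : List String × Int × Int := (["10", "0001", "111001", "1", "0"], 5, 3)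

def Spec_findMaxForm (strs : List String) (m : Int) (n : Int) (out : Int) : Prop := out = findMaxForm_alt strs m n
instance (strs : List String) (m : Int) (n : Int) (out : Int) : Decidable (Spec_findMaxForm strs m n out) := by unfold Spec_findMaxForm; infer_instance

-- ===== CLAIM (what is proved, stated in full; the proofs are below) =====
def Claim_equal_findMaxForm : Prop := ∀ (strs : List String) (m : Int) (n : Int), Dom_findMaxForm strs m n → Pre_findMaxForm strs m n → Spec_findMaxForm strs m n (findMaxForm strs m n)
-- ===== LEMMAS AND PROOFS =====

-- the common pure recursion both programs compute: max number of pairs from the list that fit the budget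
def optKS : List (Int × Int) → Int → Int → Int
  | [], _, _ => 0
  | (z, o) :: r, zl, ol =>
    if z ≤ zl ∧ o ≤ ol then max (optKS r zl ol) (1 + optKS r (zl - z) (ol - o)) else optKS r zl ol

-- [t, t-1, …, 0], the reversed range, in head-recursion form
def revR : Nat → List Int
  | 0 => [0]
  | t + 1 => ((t : Int) + 1) :: revR t

lemma pyRangeRev (t : Nat) : (PySem.List.pyRange 0 ((t : Int) + 1) 1).reverse = revR t := by
  induction t with
  | zero =>
    rw [show ((0 : Nat) : Int) + 1 = 0 + 1 by norm_num, PySem.List.pyRange_one_singleton]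
    rfl
  | succ t ih =>
    rw [show (((t + 1 : Nat)) : Int) + 1 = ((t : Int) + 1) + 1 by push_cast; ring,
      PySem.List.pyRange_one_succ_right (by positivity), List.reverse_append]
    simp only [List.reverse_cons, List.reverse_nil, List.nil_append, List.cons_append,
      ih, revR]

-- appending one item to the list is exactly one DP pass
lemma optKS_append (l : List (Int × Int)) (z o zl ol : Int) (hz : 0 ≤ z) (ho : 0 ≤ o)
    (hl : ∀ p ∈ l, 0 ≤ p.1 ∧ 0 ≤ p.2) :
    optKS (l ++ [(z, o)]) zl ol =
      if o ≤ ol ∧ z ≤ zl then max (optKS l (zl - z) (ol - o) + 1) (optKS l zl ol)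
      else optKS l zl ol := by
  induction l generalizing zl ol with
  | nil => simp only [List.nil_append, optKS]; split_ifs <;> omega
  | cons p r ih =>
    obtain ⟨z1, o1⟩ := p
    have hp := hl (z1, o1) List.mem_cons_self
    have hr : ∀ p ∈ r, 0 ≤ p.1 ∧ 0 ≤ p.2 := fun p hp => hl p (List.mem_cons_of_mem _ hp)
    simp only [List.cons_append, optKS]
    rw [ih zl ol hr, ih (zl - z1) (ol - o1) hr,
      show zl - z1 - z = zl - z - z1 by ring, show ol - o1 - o = ol - o - o1 by ring]
    simp only at hp
    split_ifs <;> omega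

-- ===== A side: the in-place reversed double loop is one pure pass =====

-- one assignment of the inner loop, assuming the cells it reads are still the pre-pass values
lemma upd_eq (z o : Int) (hz : 0 ≤ z) (ho : 0 ≤ o) (D d : Int → Int → Int) (i j : Int)
    (H : ∀ a b, (a < i ∨ (a = i ∧ b ≤ j)) → d a b = D a b) (a b : Int) :
    (if o ≤ j ∧ z ≤ i then
        (fun a b => if a = i ∧ b = j then max (d (i - z) (j - o) + 1) (d i j) else d a b)
      else d) a b =
      if a = i ∧ b = j then
        (if o ≤ j ∧ z ≤ i then max (D (i - z) (j - o) + 1) (D i j) else D i j)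
      else d a b := by
  by_cases hc : o ≤ j ∧ z ≤ i
  · rw [if_pos hc]
    show (if a = i ∧ b = j then max (d (i - z) (j - o) + 1) (d i j) else d a b) = _
    by_cases hab : a = i ∧ b = j
    · rw [if_pos hab, if_pos hab, if_pos hc,
        H (i - z) (j - o) (by omega), H i j (Or.inr ⟨rfl, le_refl j⟩)]
    · rw [if_neg hab, if_neg hab]
  · rw [if_neg hc]
    by_cases hab : a = i ∧ b = j
    · rw [if_pos hab, if_neg hc, hab.1, hab.2, H i j (Or.inr ⟨rfl, le_refl j⟩)]
    · rw [if_neg hab]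

-- the inner loop over row i, columns t…0: every cell it reads still holds its pre-pass value
lemma inner_loop (z o : Int) (hz : 0 ≤ z) (ho : 0 ≤ o) (D : Int → Int → Int) (i : Int)
    (t : Nat) :
    ∀ d : Int → Int → Int,
      (∀ a b, (a < i ∨ (a = i ∧ b ≤ (t : Int))) → d a b = D a b) →
      ∀ a b,
        ((revR t).foldl (fun d j =>
          if o ≤ j ∧ z ≤ i then
            (fun a b => if a = i ∧ b = j then max (d (i - z) (j - o) + 1) (d i j) else d a b)
          else d) d) a b =
        if a = i ∧ 0 ≤ b ∧ b ≤ (t : Int) then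
          (if o ≤ b ∧ z ≤ i then max (D (i - z) (b - o) + 1) (D i b) else D i b)
        else d a b := by
  induction t with
  | zero =>
    intro d H a b
    simp only [revR, List.foldl_cons, List.foldl_nil, Nat.cast_zero]
    rw [upd_eq z o hz ho D d i 0 (fun a b h => H a b (by simpa using h)) a b]
    by_cases hb : a = i ∧ b = 0
    · obtain ⟨h1, h2⟩ := hb
      subst h2
      rw [if_pos (show a = i ∧ (0 : ℤ) = 0 from ⟨h1, rfl⟩),
        if_pos (show a = i ∧ (0 : ℤ) ≤ 0 ∧ (0 : ℤ) ≤ 0 from ⟨h1, le_refl _, le_refl _⟩)]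
    · rw [if_neg hb, if_neg (show ¬(a = i ∧ (0 : ℤ) ≤ b ∧ b ≤ 0) from by
        rintro ⟨x1, x2, x3⟩; exact hb ⟨x1, le_antisymm x3 x2⟩)]
  | succ t ih =>
    intro d H a b
    have Hc : ∀ a b, (a < i ∨ (a = i ∧ b ≤ (t : Int) + 1)) → d a b = D a b := by
      intro a b h
      exact H a b (by push_cast; omega)
    simp only [revR, List.foldl_cons]
    rw [ih _ (fun a b h => by
      rw [upd_eq z o hz ho D d i ((t : Int) + 1) Hc a b,
        if_neg (show ¬(a = i ∧ b = (t : Int) + 1) from by rintro ⟨x1, x2⟩; omega)]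
      exact H a b (by push_cast; omega))]
    rw [upd_eq z o hz ho D d i ((t : Int) + 1) Hc a b]
    by_cases h1 : a = i ∧ 0 ≤ b ∧ b ≤ (t : Int)
    · rw [if_pos h1,
        if_pos (show a = i ∧ 0 ≤ b ∧ b ≤ ((t + 1 : Nat) : Int) from
          ⟨h1.1, h1.2.1, by push_cast; omega⟩)]
    · rw [if_neg h1]
      by_cases h2 : a = i ∧ b = (t : Int) + 1
      · obtain ⟨ha, hb⟩ := h2
        subst hb
        rw [if_pos (show a = i ∧ (t : Int) + 1 = (t : Int) + 1 from ⟨ha, rfl⟩),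
          if_pos (show a = i ∧ 0 ≤ (t : Int) + 1 ∧ (t : Int) + 1 ≤ ((t + 1 : Nat) : Int) from
            ⟨ha, by omega, by omega⟩)]
      · rw [if_neg h2,
          if_neg (show ¬(a = i ∧ 0 ≤ b ∧ b ≤ ((t + 1 : Nat) : Int)) from by
            rintro ⟨ha, hb1, hb2⟩
            push_cast at hb2
            rcases lt_or_eq_of_le hb2 with h | h
            · exact h1 ⟨ha, hb1, by omega⟩
            · exact h2 ⟨ha, h⟩)]

-- the outer loop over rows t…0
lemma outer_loop (z o : Int) (hz : 0 ≤ z) (ho : 0 ≤ o) (D : Int → Int → Int) (tn : Nat) (t : Nat) :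
    ∀ d : Int → Int → Int,
      (∀ a b, a ≤ (t : Int) → d a b = D a b) →
      ∀ a b,
        ((revR t).foldl (fun d i =>
          ((revR tn).foldl (fun d j =>
            if o ≤ j ∧ z ≤ i then
              (fun a b => if a = i ∧ b = j then max (d (i - z) (j - o) + 1) (d i j) else d a b)
            else d) d)) d) a b =
        if 0 ≤ a ∧ a ≤ (t : Int) ∧ 0 ≤ b ∧ b ≤ (tn : Int) then
          (if o ≤ b ∧ z ≤ a then max (D (a - z) (b - o) + 1) (D a b) else D a b)
        else d a b := by
  induction t with
  | zero =>
    intro d H a b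
    simp only [revR, List.foldl_cons, List.foldl_nil, Nat.cast_zero]
    rw [inner_loop z o hz ho D 0 tn d (fun a b h => H a b (by omega)) a b]
    by_cases h : a = 0 ∧ 0 ≤ b ∧ b ≤ (tn : Int)
    · obtain ⟨h0, hb⟩ := h
      subst h0
      rw [if_pos (show (0 : ℤ) = 0 ∧ 0 ≤ b ∧ b ≤ (tn : Int) from ⟨rfl, hb⟩),
        if_pos (show (0 : ℤ) ≤ 0 ∧ (0 : ℤ) ≤ 0 ∧ 0 ≤ b ∧ b ≤ (tn : Int) from ⟨le_refl _, le_refl _, hb⟩)]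
    · rw [if_neg h, if_neg (show ¬((0 : ℤ) ≤ a ∧ a ≤ 0 ∧ 0 ≤ b ∧ b ≤ (tn : Int)) from by
        rintro ⟨x1, x2, x3, x4⟩; exact h ⟨le_antisymm x2 x1, x3, x4⟩)]
  | succ t ih =>
    intro d H a b
    have Hin : ∀ a b, (a < (t : Int) + 1 ∨ (a = (t : Int) + 1 ∧ b ≤ ((tn : Nat) : Int))) →
        d a b = D a b := by
      intro a b h
      exact H a b (by push_cast; omega)
    simp only [revR, List.foldl_cons]
    rw [ih _ (fun a b hb => by
      rw [inner_loop z o hz ho D ((t : Int) + 1) tn d Hin a b,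
        if_neg (show ¬(a = (t : Int) + 1 ∧ 0 ≤ b ∧ b ≤ ((tn : Nat) : Int)) from by
          rintro ⟨x1, _⟩; omega)]
      exact H a b (by push_cast; omega))]
    rw [inner_loop z o hz ho D ((t : Int) + 1) tn d Hin a b]
    by_cases h1 : 0 ≤ a ∧ a ≤ (t : Int) ∧ 0 ≤ b ∧ b ≤ (tn : Int)
    · rw [if_pos h1,
        if_pos (show 0 ≤ a ∧ a ≤ ((t + 1 : Nat) : Int) ∧ 0 ≤ b ∧ b ≤ (tn : Int) from
          ⟨h1.1, by push_cast; omega, h1.2.2⟩)]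
    · rw [if_neg h1]
      by_cases h2 : a = (t : Int) + 1 ∧ 0 ≤ b ∧ b ≤ (tn : Int)
      · obtain ⟨ha, hb⟩ := h2
        subst ha
        rw [if_pos (show (t : Int) + 1 = (t : Int) + 1 ∧ 0 ≤ b ∧ b ≤ (tn : Int) from ⟨rfl, hb⟩),
          if_pos (show 0 ≤ (t : Int) + 1 ∧ (t : Int) + 1 ≤ ((t + 1 : Nat) : Int) ∧ 0 ≤ b ∧ b ≤ (tn : Int) from
            ⟨by positivity, by push_cast; omega, hb⟩)]
      · rw [if_neg h2,
          if_neg (show ¬(0 ≤ a ∧ a ≤ ((t + 1 : Nat) : Int) ∧ 0 ≤ b ∧ b ≤ (tn : Int)) from by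
            rintro ⟨x1, x2, x3, x4⟩
            push_cast at x2
            rcases lt_or_eq_of_le x2 with h | h
            · exact h1 ⟨x1, by omega, x3, x4⟩
            · exact h2 ⟨h, x3, x4⟩)]

-- the fold over the strings: the table agrees with optKS on the processed prefix
-- one whole string-pass of A, as a pure table transformation
lemma pass_eq (m n : Int) (hm : 0 ≤ m) (hn : 0 ≤ n) (z o : Int) (hz : 0 ≤ z) (ho : 0 ≤ o)
    (D : Int → Int → Int) (a b : Int) :
    (((PySem.List.pyRange 0 (m + 1) 1).reverse).foldl (fun dp i =>
      ((PySem.List.pyRange 0 (n + 1) 1).reverse).foldl (fun dp j =>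
        if o ≤ j ∧ z ≤ i then
          fun a b => if a = i ∧ b = j then max (dp (i - z) (j - o) + 1) (dp i j) else dp a b
        else dp) dp) D) a b =
    if 0 ≤ a ∧ a ≤ m ∧ 0 ≤ b ∧ b ≤ n then
      (if o ≤ b ∧ z ≤ a then max (D (a - z) (b - o) + 1) (D a b) else D a b)
    else D a b := by
  have hm' : m = ((m.toNat : Nat) : Int) := (Int.toNat_of_nonneg hm).symm
  have hn' : n = ((n.toNat : Nat) : Int) := (Int.toNat_of_nonneg hn).symm
  rw [hm', hn', pyRangeRev m.toNat, pyRangeRev n.toNat,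
    outer_loop z o hz ho D n.toNat m.toNat D (fun a b _ => rfl) a b]

lemma fold_correct (m n : Int) (hm : 0 ≤ m) (hn : 0 ≤ n) :
    ∀ (ss : List String) (l : List (Int × Int)) (d : Int → Int → Int),
      (∀ p ∈ l, 0 ≤ p.1 ∧ 0 ≤ p.2) →
      (∀ a b, 0 ≤ a ∧ a ≤ m ∧ 0 ≤ b ∧ b ≤ n → d a b = optKS l a b) →
      ∀ a b, 0 ≤ a ∧ a ≤ m ∧ 0 ≤ b ∧ b ≤ n →
        (ss.foldl (fun dp s =>
          let ones : Int := (PySem.Str.count s "1" : Int)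
          let zeros : Int := (PySem.Str.count s "0" : Int)
          ((PySem.List.pyRange 0 (m + 1) 1).reverse).foldl (fun dp i =>
            ((PySem.List.pyRange 0 (n + 1) 1).reverse).foldl (fun dp j =>
              if ones ≤ j ∧ zeros ≤ i then
                fun a b => if a = i ∧ b = j then max (dp (i - zeros) (j - ones) + 1) (dp i j) else dp a b
              else dp) dp) dp) d) a b =
        optKS (l ++ ss.map (fun s => ((PySem.Str.count s "0" : Int), (PySem.Str.count s "1" : Int)))) a b := by
  intro ss
  induction ss with
  | nil =>
    intro l d _ hd a b hab
    simpa using hd a b hab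
  | cons s ss ih =>
    intro l d hl hd a b hab
    set z1 : Int := (PySem.Str.count s "0" : Int) with hz1def
    set o1 : Int := (PySem.Str.count s "1" : Int) with ho1def
    have hz1 : 0 ≤ z1 := Int.natCast_nonneg _
    have ho1 : 0 ≤ o1 := Int.natCast_nonneg _
    have hl' : ∀ p ∈ l ++ [(z1, o1)], 0 ≤ p.1 ∧ 0 ≤ p.2 := by
      intro p hp
      rcases List.mem_append.mp hp with h | h
      · exact hl p h
      · simp only [List.mem_singleton] at h
        subst h
        exact ⟨hz1, ho1⟩
    simp only [List.foldl_cons]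
    rw [ih (l ++ [(z1, o1)]) _ hl' (fun a b hab => by
      show (((PySem.List.pyRange 0 (m + 1) 1).reverse).foldl (fun dp i =>
          ((PySem.List.pyRange 0 (n + 1) 1).reverse).foldl (fun dp j =>
            if o1 ≤ j ∧ z1 ≤ i then
              fun a b => if a = i ∧ b = j then max (dp (i - z1) (j - o1) + 1) (dp i j) else dp a b
            else dp) dp) d) a b = _
      rw [pass_eq m n hm hn z1 o1 hz1 ho1 d a b, if_pos hab,
        optKS_append l z1 o1 a b hz1 ho1 hl]
      by_cases hfit : o1 ≤ b ∧ z1 ≤ a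
      · rw [if_pos hfit, if_pos hfit,
          hd (a - z1) (b - o1) ⟨by omega, by omega, by omega, by omega⟩, hd a b hab]
      · rw [if_neg hfit, if_neg hfit, hd a b hab]) a b hab]
    rw [List.append_assoc]
    rfl
-- ===== bridging A's list-of-lists table to the function table =====

def dpRead (L : List (List Int)) (a b : Int) : Int :=
  PySem.List.pyGetD (PySem.List.pyGetD L a []) b 0

def dpRel (m n : Int) (L : List (List Int)) (d : Int → Int → Int) : Prop :=
  (L.length = (m + 1).toNat ∧ ∀ r ∈ L, r.length = (n + 1).toNat) ∧
  ∀ a b : Int, 0 ≤ a → 0 ≤ b → dpRead L a b = d a b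

lemma foldl_rel {α β γ : Type} (R : α → β → Prop) (f : α → γ → α) (g : β → γ → β) :
    ∀ (xs : List γ) (L : α) (d : β), R L d →
      (∀ x ∈ xs, ∀ L d, R L d → R (f L x) (g d x)) →
      R (xs.foldl f L) (xs.foldl g d) := by
  intro xs
  induction xs with
  | nil => intro L d h _; exact h
  | cons x xs ih =>
    intro L d h hstep
    exact ih _ _ (hstep x List.mem_cons_self L d h)
      (fun y hy => hstep y (List.mem_cons_of_mem _ hy))

-- one Python assignment dp[i][j] = … preserves the relation
lemma set_rel (m n z o i j : Int) (hi : 0 ≤ i ∧ i ≤ m) (hj : 0 ≤ j ∧ j ≤ n)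
    (L : List (List Int)) (d : Int → Int → Int) (h : dpRel m n L d) :
    dpRel m n
      (if o ≤ j ∧ z ≤ i then
        L.set i.toNat ((PySem.List.pyGetD L i []).set j.toNat
          (max (PySem.List.pyGetD (PySem.List.pyGetD L (i - z) []) (j - o) 0 + 1)
               (PySem.List.pyGetD (PySem.List.pyGetD L i []) j 0)))
      else L)
      (if o ≤ j ∧ z ≤ i then
        (fun a b => if a = i ∧ b = j then max (d (i - z) (j - o) + 1) (d i j) else d a b)
      else d) := by
  by_cases hc : o ≤ j ∧ z ≤ i
  · rw [if_pos hc, if_pos hc]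
    obtain ⟨⟨hlen, hrows⟩, hread⟩ := h
    have hiL : i.toNat < L.length := by rw [hlen]; omega
    have hrowe : PySem.List.pyGetD L i [] = L[i.toNat] :=
      PySem.List.pyGetD_eq_getElem L [] hi.1 (by omega)
    have hrowlen : L[i.toNat].length = (n + 1).toNat := hrows _ (List.getElem_mem hiL)
    have hjrow : j.toNat < L[i.toNat].length := by rw [hrowlen]; omega
    refine ⟨⟨by rw [List.length_set]; exact hlen, ?_⟩, ?_⟩
    · intro r hr
      rcases List.mem_or_eq_of_mem_set hr with h' | h'
      · exact hrows r h'
      · rw [h', List.length_set, hrowe, hrowlen]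
    · intro a b ha hb
      show PySem.List.pyGetD (PySem.List.pyGetD (List.set L _ _) a []) b 0 = _
      rw [PySem.List.pyGetD_of_nonneg _ _ ha, List.getD_eq_getElem?_getD]
      by_cases hai : a = i
      · subst hai
        rw [List.getElem?_set_self hiL, Option.getD_some]
        show PySem.List.pyGetD ((PySem.List.pyGetD L a []).set _ _) b 0 = _
        rw [PySem.List.pyGetD_of_nonneg _ _ hb, List.getD_eq_getElem?_getD, hrowe]
        by_cases hbj : b = j
        · subst hbj
          rw [List.getElem?_set_self hjrow, Option.getD_some, ← hrowe]
          show max (dpRead L (a - z) (b - o) + 1) (dpRead L a b) =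
            if a = a ∧ b = b then max (d (a - z) (b - o) + 1) (d a b) else d a b
          rw [hread (a - z) (b - o) (by omega) (by omega), hread a b ha hb,
            if_pos ⟨rfl, rfl⟩]
        · rw [List.getElem?_set_ne (show j.toNat ≠ b.toNat by omega)]
          have hL : L[a.toNat][b.toNat]?.getD 0 = dpRead L a b := by
            rw [dpRead, PySem.List.pyGetD_of_nonneg _ _ hb, List.getD_eq_getElem?_getD, hrowe]
          rw [hL, hread a b ha hb]
          show d a b = if a = a ∧ b = j then max (d (a - z) (j - o) + 1) (d a j) else d a b
          rw [if_neg (by rintro ⟨_, h'⟩; exact hbj h')]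
      · rw [List.getElem?_set_ne (show i.toNat ≠ a.toNat by omega)]
        have hL : L[a.toNat]?.getD [] = PySem.List.pyGetD L a [] := by
          rw [PySem.List.pyGetD_of_nonneg _ _ ha, List.getD_eq_getElem?_getD]
        rw [hL,
          show PySem.List.pyGetD (PySem.List.pyGetD L a []) b 0 = dpRead L a b from rfl,
          hread a b ha hb]
        show d a b = if a = i ∧ b = j then max (d (i - z) (j - o) + 1) (d i j) else d a b
        rw [if_neg (by rintro ⟨h', _⟩; exact hai h')]
  · rw [if_neg hc, if_neg hc]
    exact h

-- the whole double loop of one string preserves the relation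
lemma pass_rel (m n z o : Int) (L : List (List Int)) (d : Int → Int → Int)
    (h : dpRel m n L d) :
    dpRel m n
      (((PySem.List.pyRange 0 (m + 1) 1).reverse).foldl (fun dp i =>
        ((PySem.List.pyRange 0 (n + 1) 1).reverse).foldl (fun dp j =>
          if o ≤ j ∧ z ≤ i then
            dp.set i.toNat ((PySem.List.pyGetD dp i []).set j.toNat
              (max (PySem.List.pyGetD (PySem.List.pyGetD dp (i - z) []) (j - o) 0 + 1)
                   (PySem.List.pyGetD (PySem.List.pyGetD dp i []) j 0)))
          else dp) dp) L)
      (((PySem.List.pyRange 0 (m + 1) 1).reverse).foldl (fun dp i =>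
        ((PySem.List.pyRange 0 (n + 1) 1).reverse).foldl (fun dp j =>
          if o ≤ j ∧ z ≤ i then
            (fun a b => if a = i ∧ b = j then max (dp (i - z) (j - o) + 1) (dp i j) else dp a b)
          else dp) dp) d) := by
  refine foldl_rel (dpRel m n) _ _ _ L d h ?_
  intro i hiMem L' d' h'
  have hi : 0 ≤ i ∧ i ≤ m := by
    rw [List.mem_reverse, PySem.List.mem_pyRange_one] at hiMem
    omega
  refine foldl_rel (dpRel m n) _ _ _ L' d' h' ?_
  intro j hjMem L'' d'' h''
  have hj : 0 ≤ j ∧ j ≤ n := by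
    rw [List.mem_reverse, PySem.List.mem_pyRange_one] at hjMem
    omega
  exact set_rel m n z o i j hi hj L'' d'' h''

lemma getD_zero_of_all (r : List Int) (hall : ∀ x ∈ r, x = 0) (k : Nat) : r.getD k 0 = 0 := by
  rw [List.getD_eq_getElem?_getD]
  cases hk : r[k]? with
  | none => rfl
  | some x => exact hall x (List.mem_of_getElem? hk)

-- the freshly initialised table reads 0 everywhere (nonnegative indices)
lemma init_rel (m n : Int) :
    dpRel m n
      ((PySem.List.pyRange 0 (m + 1) 1).map (fun _ =>
        (PySem.List.pyRange 0 (n + 1) 1).map (fun _ => (0 : Int))))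
      (fun _ _ => (0 : Int)) := by
  refine ⟨⟨?_, ?_⟩, ?_⟩
  · rw [List.length_map, PySem.List.length_pyRange_one]
    omega
  · intro r hr
    obtain ⟨x, _, hx⟩ := List.mem_map.mp hr
    rw [← hx, List.length_map, PySem.List.length_pyRange_one]
    omega
  · intro a b ha hb
    have hall : ∀ r ∈ (PySem.List.pyRange 0 (m + 1) 1).map (fun _ =>
        (PySem.List.pyRange 0 (n + 1) 1).map (fun _ => (0 : Int))), ∀ x ∈ r, x = 0 := by
      intro r hr x hx
      obtain ⟨y, _, hy⟩ := List.mem_map.mp hr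
      rw [← hy] at hx
      obtain ⟨w, _, hw⟩ := List.mem_map.mp hx
      exact hw.symm
    rw [dpRead, PySem.List.pyGetD_of_nonneg _ _ ha, List.getD_eq_getElem?_getD]
    cases hk : ((PySem.List.pyRange 0 (m + 1) 1).map (fun _ =>
        (PySem.List.pyRange 0 (n + 1) 1).map (fun _ => (0 : Int))))[a.toNat]? with
    | none =>
      show PySem.List.pyGetD ([] : List Int) b 0 = 0
      rw [PySem.List.pyGetD_of_nonneg _ _ hb]
      rfl
    | some r =>
      show PySem.List.pyGetD r b 0 = 0
      rw [PySem.List.pyGetD_of_nonneg _ _ hb]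
      exact getD_zero_of_all r (hall r (List.mem_of_getElem? hk)) b.toNat

-- ===== B side: the memoised recursion computes optKS =====

def GoodMemo (counts : List (Int × Int)) (memo : PySem.Dict (Int × Int × Int) Int) : Prop :=
  ∀ (i zl ol v : Int), memo.get? (i, zl, ol) = some v →
    ∃ k : Nat, i = (k : Int) ∧ v = optKS (counts.drop k) zl ol

lemma solveGo_correct (counts : List (Int × Int)) :
    ∀ (cs : List (Int × Int)) (k : Nat) (zl ol : Int)
      (memo : PySem.Dict (Int × Int × Int) Int),
      cs = counts.drop k → GoodMemo counts memo →
      (solveGo cs (k : Int) zl ol memo).1 = optKS cs zl ol ∧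
        GoodMemo counts (solveGo cs (k : Int) zl ol memo).2 := by
  intro cs
  induction cs with
  | nil =>
    intro k zl ol memo hcs hG
    exact ⟨rfl, hG⟩
  | cons p rest ih =>
    obtain ⟨z, o⟩ := p
    intro k zl ol memo hcs hG
    have hrest : rest = counts.drop (k + 1) := by
      rw [← List.tail_drop, ← hcs]
      rfl
    cases hget : memo.get? ((k : Int), zl, ol) with
    | some v =>
      obtain ⟨k', hk', hv⟩ := hG (k : Int) zl ol v hget
      have hkk : k = k' := by exact_mod_cast hk'
      subst hkk
      refine ⟨?_, ?_⟩
      · simp only [solveGo, hget]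
        rw [hv, ← hcs]
      · simp only [solveGo, hget]
        exact hG
    | none =>
      have h1 := ih (k + 1) zl ol memo hrest hG
      push_cast at h1
      by_cases hcond : z ≤ zl ∧ o ≤ ol
      · have h2 := ih (k + 1) (zl - z) (ol - o) (solveGo rest ((k : Int) + 1) zl ol memo).2
          hrest h1.2
        push_cast at h2
        have hval : (solveGo ((z, o) :: rest) (k : Int) zl ol memo).1 =
            optKS ((z, o) :: rest) zl ol := by
          simp only [solveGo, hget, if_pos hcond, optKS, h1.1, h2.1]
        refine ⟨hval, ?_⟩
        have hmemo : (solveGo ((z, o) :: rest) (k : Int) zl ol memo).2 =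
            ((solveGo rest ((k : Int) + 1) (zl - z) (ol - o)
              (solveGo rest ((k : Int) + 1) zl ol memo).2).2).insert ((k : Int), zl, ol)
              ((solveGo ((z, o) :: rest) (k : Int) zl ol memo).1) := by
          simp only [solveGo, hget, if_pos hcond]
        rw [hmemo, hval]
        intro i' zl' ol' v hv
        rw [PySem.Dict.get?_insert] at hv
        split_ifs at hv with hkey
        · simp only [Prod.mk.injEq] at hkey
          obtain ⟨hi, hzl, hol⟩ := hkey
          subst hi; subst hzl; subst hol
          exact ⟨k, rfl, by rw [← hcs]; exact (Option.some.inj hv).symm⟩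
        · exact h2.2 i' zl' ol' v hv
      · have hval : (solveGo ((z, o) :: rest) (k : Int) zl ol memo).1 =
            optKS ((z, o) :: rest) zl ol := by
          simp only [solveGo, hget, if_neg hcond, optKS, h1.1]
        refine ⟨hval, ?_⟩
        have hmemo : (solveGo ((z, o) :: rest) (k : Int) zl ol memo).2 =
            ((solveGo rest ((k : Int) + 1) zl ol memo).2).insert ((k : Int), zl, ol)
              ((solveGo ((z, o) :: rest) (k : Int) zl ol memo).1) := by
          simp only [solveGo, hget, if_neg hcond]
        rw [hmemo, hval]
        intro i' zl' ol' v hv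
        rw [PySem.Dict.get?_insert] at hv
        split_ifs at hv with hkey
        · simp only [Prod.mk.injEq] at hkey
          obtain ⟨hi, hzl, hol⟩ := hkey
          subst hi; subst hzl; subst hol
          exact ⟨k, rfl, by rw [← hcs]; exact (Option.some.inj hv).symm⟩
        · exact h1.2 i' zl' ol' v hv

-- ===== VERDICT (by name: the statement is the Claim_ definition above) =====
theorem findMaxForm_spec : Claim_equal_findMaxForm := by
  intro strs m n _ hpre
  obtain ⟨hm, hn⟩ := hpre
  show findMaxForm strs m n = findMaxForm_alt strs m n
  have hGempty : GoodMemo (strs.map (fun s =>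
      ((PySem.Str.count s "0" : Int), (PySem.Str.count s "1" : Int)))) PySem.Dict.empty := by
    intro i zl ol v h
    rw [PySem.Dict.get?_empty] at h
    cases h
  have hB := (solveGo_correct _ (strs.map (fun s =>
      ((PySem.Str.count s "0" : Int), (PySem.Str.count s "1" : Int)))) 0 m n
      PySem.Dict.empty (by simp) hGempty).1
  push_cast at hB
  have hrel : dpRel m n
      (strs.foldl (fun dp s =>
        let ones : Int := (PySem.Str.count s "1" : Int)
        let zeros : Int := (PySem.Str.count s "0" : Int)
        ((PySem.List.pyRange 0 (m + 1) 1).reverse).foldl (fun dp i =>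
          ((PySem.List.pyRange 0 (n + 1) 1).reverse).foldl (fun dp j =>
            if ones ≤ j ∧ zeros ≤ i then
              dp.set i.toNat ((PySem.List.pyGetD dp i []).set j.toNat
                (max (PySem.List.pyGetD (PySem.List.pyGetD dp (i - zeros) []) (j - ones) 0 + 1)
                     (PySem.List.pyGetD (PySem.List.pyGetD dp i []) j 0)))
            else dp) dp) dp)
        ((PySem.List.pyRange 0 (m + 1) 1).map (fun _ =>
          (PySem.List.pyRange 0 (n + 1) 1).map (fun _ => (0 : Int)))))
      (strs.foldl (fun dp s =>
        let ones : Int := (PySem.Str.count s "1" : Int)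
        let zeros : Int := (PySem.Str.count s "0" : Int)
        ((PySem.List.pyRange 0 (m + 1) 1).reverse).foldl (fun dp i =>
          ((PySem.List.pyRange 0 (n + 1) 1).reverse).foldl (fun dp j =>
            if ones ≤ j ∧ zeros ≤ i then
              fun a b => if a = i ∧ b = j then max (dp (i - zeros) (j - ones) + 1) (dp i j)
                else dp a b
            else dp) dp) dp) (fun _ _ => (0 : Int))) :=
    foldl_rel (dpRel m n) _ _ strs _ _ (init_rel m n)
      (fun s _ L d h => pass_rel m n ((PySem.Str.count s "0" : Int))
        ((PySem.Str.count s "1" : Int)) L d h)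
  show dpRead _ m n = _
  rw [hrel.2 m n hm hn,
    fold_correct m n hm hn strs [] (fun _ _ => 0) (by simp) (fun a b _ => rfl) m n
      ⟨hm, le_refl m, hn, le_refl n⟩, List.nil_append]
  exact hB.symm
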